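-- pv_equiv track=rewrite | github.com/omaralzare/Codewars | 8kyu/price of mangos.py | mango
-- ===== SOURCE A (Python) =====
-- def mango(quantity, price):
--     counterPrice = 0
--     finalPrice = 0
--     for i in range(1, quantity + 1):
--         counterPrice += 1
--         if counterPrice == 3:
--             counterPrice = 0
--             continue
--         finalPrice += price
--     return finalPrice
-- ===== SOURCE B (Python) =====
-- def mango(quantity, price):
--     q = max(quantity, 0)
--     return (q - q // 3) * price
-- ===== Notes on version B (the rewrite author's own statement) =====
-- stated objective: faster
-- what changed: Replaced the per-mango counting loop with the closed form (q - q//3) * price (clamping quantity at 0, matching the empty range).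
import Mathlib
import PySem

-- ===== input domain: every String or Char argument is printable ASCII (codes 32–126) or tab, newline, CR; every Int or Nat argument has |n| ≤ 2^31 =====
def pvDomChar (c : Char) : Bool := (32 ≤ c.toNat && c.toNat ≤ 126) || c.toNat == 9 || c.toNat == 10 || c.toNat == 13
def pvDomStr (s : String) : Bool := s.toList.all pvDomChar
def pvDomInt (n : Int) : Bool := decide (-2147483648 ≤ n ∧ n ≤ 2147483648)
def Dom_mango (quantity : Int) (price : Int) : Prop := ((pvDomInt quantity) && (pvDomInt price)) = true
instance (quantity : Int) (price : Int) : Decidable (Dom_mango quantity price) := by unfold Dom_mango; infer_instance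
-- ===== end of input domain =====

-- B replaces A's per-mango counting loop with the O(1) closed form (q - q//3) * price.
-- ===== PORT A =====
-- step of A's loop: counterPrice += 1; if ==3 reset & skip else finalPrice += price
def mangoStep (price : Int) (st : Int × Int) (_i : Int) : Int × Int :=
  let c := st.1 + 1
  if c = 3 then (0, st.2) else (c, st.2 + price)

def mango (quantity : Int) (price : Int) : Int :=
  ((PySem.List.pyRange 1 (quantity + 1) 1).foldl (mangoStep price) (0, 0)).2

-- ===== PORT B =====
def mango_alt (quantity : Int) (price : Int) : Int :=
  let q := max quantity 0
  (q - PySem.Int.floordiv q 3) * price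

-- ===== PRECONDITION & SPEC =====
def Spec_mango (quantity : Int) (price : Int) (out : Int) : Prop := out = mango_alt quantity price
instance (quantity : Int) (price : Int) (out : Int) : Decidable (Spec_mango quantity price out) := by unfold Spec_mango; infer_instance

-- ===== CLAIM (what is proved, stated in full; the proofs are below) =====
def Claim_equal_mango : Prop := ∀ (quantity : Int) (price : Int), Dom_mango quantity price → Spec_mango quantity price (mango quantity price)

-- ===== LEMMAS AND PROOFS =====

-- ===== VERDICT (by name: the statement is the Claim_ definition above) =====
-- the fold over any length-n range from state (0,0) ends at (n % 3, (n - n/3) * price)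
theorem mango_loop (price : Int) (n : Nat) (a : Int) :
    ((PySem.List.pyRange a (a + n) 1).foldl (mangoStep price) (0, 0))
      = (((n % 3 : Nat) : Int), ((n : Int) - ((n / 3 : Nat) : Int)) * price) := by
  induction n generalizing a with
  | zero => simp [PySem.List.pyRange_one_eq_nil]
  | succ m ih =>
      have h : PySem.List.pyRange a (a + (m : Int) + 1) 1
          = PySem.List.pyRange a (a + m) 1 ++ [(a + m : Int)] :=
        PySem.List.pyRange_one_succ_right (a := a) (b := a + m) (by omega)
      rw [show ((m + 1 : Nat) : Int) = (m : Int) + 1 by push_cast; ring, ← add_assoc, h,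
        List.foldl_append, ih]
      simp only [List.foldl, mangoStep]
      by_cases hc : ((m % 3 : Nat) : Int) + 1 = 3
      · rw [if_pos hc,
          show (((m + 1) % 3 : Nat) : Int) = 0 by omega,
          show ((m : Int) - ((m / 3 : Nat) : Int)) = ((m : Int) + 1) - (((m + 1) / 3 : Nat) : Int) by omega]
      · rw [if_neg hc,
          show ((m % 3 : Nat) : Int) + 1 = (((m + 1) % 3 : Nat) : Int) by omega,
          show (((m + 1) / 3 : Nat) : Int) = ((m / 3 : Nat) : Int) by omega]
        simp only [Prod.mk.injEq]
        exact ⟨trivial, by ring⟩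

theorem mango_spec : Claim_equal_mango := by
  intro quantity price _
  unfold Spec_mango mango mango_alt
  by_cases hq : quantity ≤ 0
  · rw [PySem.List.pyRange_one_eq_nil (by omega)]
    rw [show max quantity 0 = 0 by omega]
    norm_num [PySem.Int.floordiv]
  · push_neg at hq
    obtain ⟨n, hn⟩ : ∃ n : Nat, quantity = (n : Int) := ⟨quantity.toNat, by omega⟩
    subst hn
    have := mango_loop price n 1
    rw [show (1 : Int) + n = 1 + n from rfl] at this
    rw [show ((n : Int) + 1) = 1 + n by ring, this]
    rw [show max (n : Int) 0 = (n : Int) by omega]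
    simp
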